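-- pv_equiv track=rewrite | github.com/jlescher/adventofcode | 2016/day20/solve.py | get_min_ip
-- ===== SOURCE A (Python) =====
-- def get_min_ip(ranges):
--     min_ip = 0
--     for r in sorted(ranges):
--         if r[0] > min_ip:
--             return min_ip
--         else:
--             min_ip = r[1]+1 if r[1] > min_ip else min_ip
--     return min_ip
-- ===== SOURCE B (Python) =====
-- def get_min_ip(ranges):
--     min_ip = 0
--     while True:
--         cands = [r for r in ranges if r[0] <= min_ip < r[1]]
--         if not cands:
--             return min_ip
--         min_ip = min(cands)[1] + 1
-- ===== Notes on version B (the rewrite author's own statement) =====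
-- stated objective: alternative
-- what changed: Replaces sort-then-single-sweep with a sort-free fixpoint loop: repeatedly scan all ranges for candidates that cover and extend past min_ip and jump past the smallest one until none remains.
import Mathlib
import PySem

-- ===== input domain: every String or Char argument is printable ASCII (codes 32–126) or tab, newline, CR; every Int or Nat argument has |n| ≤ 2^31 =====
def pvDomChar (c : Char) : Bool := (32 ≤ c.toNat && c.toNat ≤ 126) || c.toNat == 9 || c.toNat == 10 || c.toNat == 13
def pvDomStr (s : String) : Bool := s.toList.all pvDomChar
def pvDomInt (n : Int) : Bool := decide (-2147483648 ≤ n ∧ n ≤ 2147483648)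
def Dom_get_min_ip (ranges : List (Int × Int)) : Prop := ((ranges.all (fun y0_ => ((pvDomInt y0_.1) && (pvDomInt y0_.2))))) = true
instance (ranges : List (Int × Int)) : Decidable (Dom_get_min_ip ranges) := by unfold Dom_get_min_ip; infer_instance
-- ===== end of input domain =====

-- B replaces A's sort-plus-single-sweep by a sort-free fixpoint loop (repeated scans that
-- jump past the minimal range extending beyond min_ip); objective: alternative (not faster).

-- ===== PORT A =====
-- the 'for r in sorted(ranges)' loop with its early return
def get_min_ip_go : List (Int × Int) → Int → Int
  | [], p => p
  | r :: rest, p =>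
    if r.1 > p then p
    else get_min_ip_go rest (if r.2 > p then r.2 + 1 else p)

def get_min_ip (ranges : List (Int × Int)) : Int :=
  get_min_ip_go (PySem.List.sorted2 ranges Prod.fst Prod.snd) 0

-- ===== PORT B =====
-- lemmas the port needs for termination (cited by name in decreasing_by)
theorem pvMin2ConsCons (m0 y : Int × Int) (ys : List (Int × Int)) :
    PySem.List.min2? (m0 :: y :: ys) Prod.fst Prod.snd =
      PySem.List.min2?
        ((if (decide (y.1 < m0.1) || !decide (m0.1 < y.1) && decide (y.2 < m0.2)) = true then y else m0) :: ys)
        Prod.fst Prod.snd := by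
  simp only [PySem.List.min2?, List.foldl_cons]
  split <;> rfl

theorem pvMin2MemCons : ∀ (ys : List (Int × Int)) (m0 res : Int × Int),
    PySem.List.min2? (m0 :: ys) Prod.fst Prod.snd = some res → res = m0 ∨ res ∈ ys := by
  intro ys
  induction ys with
  | nil =>
    intro m0 res h
    rw [show PySem.List.min2? [m0] Prod.fst Prod.snd = some m0 from rfl] at h
    left; exact (Option.some.injEq .. ▸ h).symm
  | cons y ys ih =>
    intro m0 res h
    rw [pvMin2ConsCons] at h
    by_cases hc : (decide (y.1 < m0.1) || !decide (m0.1 < y.1) && decide (y.2 < m0.2)) = true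
    · rw [if_pos hc] at h
      rcases ih y res h with h1 | h1
      · right; simp [h1]
      · right; simp [h1]
    · rw [if_neg hc] at h
      rcases ih m0 res h with h1 | h1
      · left; exact h1
      · right; simp [h1]

theorem pvMin2Mem {xs : List (Int × Int)} {res : Int × Int}
    (h : PySem.List.min2? xs Prod.fst Prod.snd = some res) : res ∈ xs := by
  cases xs with
  | nil => simp [PySem.List.min2?] at h
  | cons m0 ys =>
    rcases pvMin2MemCons ys m0 res h with h1 | h1
    · simp [h1]
    · simp [h1]

theorem pvCountPlt {α : Type} {l : List α} {a : α} {p q : α → Bool}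
    (ha : a ∈ l) (hp : p a = false) (hq : q a = true)
    (himp : ∀ x ∈ l, p x = true → q x = true) : l.countP p < l.countP q := by
  induction l with
  | nil => cases ha
  | cons y ys ih =>
    rcases List.mem_cons.1 ha with rfl | hmem
    · have hle : ys.countP p ≤ ys.countP q :=
        List.countP_mono_left (fun x hx hpx => himp x (List.mem_cons_of_mem a hx) hpx)
      simp [hp, hq]
      omega
    · have h1 : ys.countP p < ys.countP q :=
        ih hmem (fun x hx hpx => himp x (List.mem_cons_of_mem y hx) hpx)
      simp only [List.countP_cons]
      by_cases hy : p y = true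
      · have hqy : q y = true := himp y List.mem_cons_self hy
        simp [hy, hqy]
        omega
      · simp only [Bool.not_eq_true] at hy
        by_cases hqy : q y = true
        · simp [hy, hqy]
          omega
        · simp only [Bool.not_eq_true] at hqy
          simp [hy, hqy]
          omega

theorem pvCandsDec (ranges : List (Int × Int)) (p : Int) (c : Int × Int)
    (h : PySem.List.min2? (ranges.filter (fun r => decide (r.1 ≤ p ∧ p < r.2)))
          Prod.fst Prod.snd = some c) :
    ranges.countP (fun r => decide (c.2 + 1 < r.2)) < ranges.countP (fun r => decide (p < r.2)) := by
  have hc := pvMin2Mem h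
  have hmem : c ∈ ranges := (List.mem_filter.1 hc).1
  have hcond : p < c.2 := by
    have := (List.mem_filter.1 hc).2
    simp only [decide_eq_true_eq] at this
    exact this.2
  refine pvCountPlt hmem ?_ ?_ ?_
  · simp
  · simp; omega
  · intro x hx hpx
    simp only [decide_eq_true_eq] at hpx ⊢
    omega

-- B: min_ip := 0; repeatedly collect ranges with r[0] <= min_ip < r[1]; if none, return
-- min_ip, else jump to min(cands)[1] + 1
def get_min_ip_alt_go (ranges : List (Int × Int)) (p : Int) : Int :=
  match h : PySem.List.min2? (ranges.filter (fun r => decide (r.1 ≤ p ∧ p < r.2)))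
              Prod.fst Prod.snd with
  | none => p
  | some c => get_min_ip_alt_go ranges (c.2 + 1)
  termination_by ranges.countP (fun r => decide (p < r.2))
  decreasing_by exact pvCandsDec ranges p c h

def get_min_ip_alt (ranges : List (Int × Int)) : Int := get_min_ip_alt_go ranges 0

-- ===== PRECONDITION & SPEC =====
def Spec_get_min_ip (ranges : List (Int × Int)) (out : Int) : Prop := out = get_min_ip_alt ranges
instance (ranges : List (Int × Int)) (out : Int) : Decidable (Spec_get_min_ip ranges out) := by unfold Spec_get_min_ip; infer_instance

-- ===== CLAIM (what is proved, stated in full; the proofs are below) =====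
def Claim_equal_get_min_ip : Prop := ∀ (ranges : List (Int × Int)), Dom_get_min_ip ranges → Spec_get_min_ip ranges (get_min_ip ranges)

-- ===== LEMMAS AND PROOFS =====

-- Python's tuple order on pairs of ints
def pvLlt (a b : Int × Int) : Prop := a.1 < b.1 ∨ (a.1 = b.1 ∧ a.2 < b.2)

theorem pvMin2MinCons : ∀ (ys : List (Int × Int)) (m0 res : Int × Int),
    PySem.List.min2? (m0 :: ys) Prod.fst Prod.snd = some res →
      ¬ pvLlt m0 res ∧ ∀ y ∈ ys, ¬ pvLlt y res := by
  intro ys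
  induction ys with
  | nil =>
    intro m0 res h
    rw [show PySem.List.min2? [m0] Prod.fst Prod.snd = some m0 from rfl] at h
    have : m0 = res := Option.some.injEq .. ▸ h
    subst this
    exact ⟨by simp [pvLlt], by simp⟩
  | cons y ys ih =>
    intro m0 res h
    rw [pvMin2ConsCons] at h
    by_cases hc : (decide (y.1 < m0.1) || !decide (m0.1 < y.1) && decide (y.2 < m0.2)) = true
    · rw [if_pos hc] at h
      obtain ⟨h1, h2⟩ := ih y res h
      have hlt : pvLlt y m0 := by
        simp only [Bool.or_eq_true, Bool.and_eq_true, Bool.not_eq_true',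
          decide_eq_true_eq, decide_eq_false_iff_not] at hc
        simp only [pvLlt]; omega
      refine ⟨?_, fun z hz => ?_⟩
      · simp only [pvLlt] at hlt h1 ⊢; omega
      · rcases List.mem_cons.1 hz with rfl | hz'
        · exact h1
        · exact h2 z hz'
    · rw [if_neg hc] at h
      obtain ⟨h1, h2⟩ := ih m0 res h
      have hge : ¬ pvLlt y m0 := by
        simp only [Bool.or_eq_true, Bool.and_eq_true, Bool.not_eq_true',
          decide_eq_true_eq, decide_eq_false_iff_not] at hc
        simp only [pvLlt]; omega
      refine ⟨h1, fun z hz => ?_⟩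
      rcases List.mem_cons.1 hz with rfl | hz'
      · simp only [pvLlt] at hge h1 ⊢; omega
      · exact h2 z hz'

theorem pvMin2Min {xs : List (Int × Int)} {res : Int × Int}
    (h : PySem.List.min2? xs Prod.fst Prod.snd = some res) :
    ∀ y ∈ xs, ¬ pvLlt y res := by
  cases xs with
  | nil => simp [PySem.List.min2?] at h
  | cons m0 ys =>
    obtain ⟨h1, h2⟩ := pvMin2MinCons ys m0 res h
    intro y hy
    rcases List.mem_cons.1 hy with rfl | hy'
    · exact h1
    · exact h2 y hy'

theorem pvMin2ConsIsSome : ∀ (ys : List (Int × Int)) (m0 : Int × Int),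
    ∃ res, PySem.List.min2? (m0 :: ys) Prod.fst Prod.snd = some res := by
  intro ys
  induction ys with
  | nil => intro m0; exact ⟨m0, rfl⟩
  | cons y ys ih =>
    intro m0
    rw [pvMin2ConsCons]
    exact ih _

theorem pvMin2EqNone {xs : List (Int × Int)}
    (h : PySem.List.min2? xs Prod.fst Prod.snd = none) : xs = [] := by
  cases xs with
  | nil => rfl
  | cons m0 ys =>
    obtain ⟨res, hres⟩ := pvMin2ConsIsSome ys m0
    rw [hres] at h
    cases h

-- sorted2 output is pairwise nondecreasing in Python's tuple order
theorem pvInsertByPairwise (x : Int × Int) (ys : List (Int × Int))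
    (h : ys.Pairwise (fun a b => ¬ pvLlt b a)) :
    (PySem.List.insertBy
        (fun a b => decide (a.1 < b.1) || !decide (b.1 < a.1) && decide (a.2 < b.2)) x ys).Pairwise
      (fun a b => ¬ pvLlt b a) := by
  induction ys with
  | nil => simp [PySem.List.insertBy]
  | cons y ys ih =>
    rw [PySem.List.insertBy]
    by_cases hc : (decide (x.1 < y.1) || !decide (y.1 < x.1) && decide (x.2 < y.2)) = true
    · rw [if_pos hc]
      have hxy : pvLlt x y := by
        simp only [Bool.or_eq_true, Bool.and_eq_true, Bool.not_eq_true',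
          decide_eq_true_eq, decide_eq_false_iff_not] at hc
        simp only [pvLlt]; omega
      refine List.pairwise_cons.2 ⟨?_, h⟩
      intro z hz
      rcases List.mem_cons.1 hz with rfl | hz'
      · simp only [pvLlt] at hxy ⊢; omega
      · have hyz : ¬ pvLlt z y := (List.pairwise_cons.1 h).1 z hz'
        simp only [pvLlt] at hxy hyz ⊢; omega
    · rw [if_neg hc]
      have hyx : ¬ pvLlt x y := by
        simp only [Bool.or_eq_true, Bool.and_eq_true, Bool.not_eq_true',
          decide_eq_true_eq, decide_eq_false_iff_not] at hc
        simp only [pvLlt]; omega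
      obtain ⟨hy, hys⟩ := List.pairwise_cons.1 h
      refine List.pairwise_cons.2 ⟨?_, ih hys⟩
      intro z hz
      rcases (PySem.List.mem_insertBy _ _ _ _).1 hz with rfl | hz'
      · exact hyx
      · exact hy z hz'

theorem pvSortedPairwise (xs : List (Int × Int)) :
    (PySem.List.sorted2 xs Prod.fst Prod.snd).Pairwise (fun a b => ¬ pvLlt b a) := by
  have aux : ∀ (l acc : List (Int × Int)), acc.Pairwise (fun a b => ¬ pvLlt b a) →
      (l.foldl (fun acc x => PySem.List.insertBy
        (fun a b => decide (a.1 < b.1) || !decide (b.1 < a.1) && decide (a.2 < b.2)) x acc)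
        acc).Pairwise (fun a b => ¬ pvLlt b a) := by
    intro l
    induction l with
    | nil => intro acc h; exact h
    | cons x l ih =>
      intro acc h
      simp only [List.foldl_cons]
      exact ih _ (pvInsertByPairwise x acc h)
  simpa only [PySem.List.sorted2] using aux xs [] List.Pairwise.nil

-- main invariant: on a sorted list sl, A's sweep from p agrees with B's rescan loop over any
-- bag 'ranges' that has the same members as sl among ranges still able to extend past p
theorem pvMain (sl : List (Int × Int)) : ∀ (p : Int) (ranges : List (Int × Int)),
    sl.Pairwise (fun a b => ¬ pvLlt b a) →
    (∀ x : Int × Int, p < x.2 → (x ∈ ranges ↔ x ∈ sl)) →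
    get_min_ip_alt_go ranges p = get_min_ip_go sl p := by
  induction sl with
  | nil =>
    intro p ranges _ H
    have hfe : ranges.filter (fun r => decide (r.1 ≤ p ∧ p < r.2)) = [] := by
      rw [List.filter_eq_nil_iff]
      intro x hx hd
      simp only [decide_eq_true_eq] at hd
      have := (H x hd.2).1 hx
      simp at this
    rw [get_min_ip_alt_go, hfe]
    rfl
  | cons r rest ih =>
    intro p ranges hpw H
    by_cases hr1 : r.1 > p
    · -- A returns p; B finds no candidate
      have hfe : ranges.filter (fun r => decide (r.1 ≤ p ∧ p < r.2)) = [] := by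
        rw [List.filter_eq_nil_iff]
        intro x hx hd
        simp only [decide_eq_true_eq] at hd
        rcases List.mem_cons.1 ((H x hd.2).1 hx) with rfl | hx'
        · omega
        · have := (List.pairwise_cons.1 hpw).1 x hx'
          simp only [pvLlt] at this
          omega
      rw [get_min_ip_alt_go, hfe]
      show p = get_min_ip_go (r :: rest) p
      simp [get_min_ip_go, hr1]
    · by_cases hr2 : r.2 > p
      · -- A bumps to r.2+1 via the head; B's minimal candidate is exactly r
        have hrmem : r ∈ ranges := (H r hr2).2 List.mem_cons_self
        have hrc : r ∈ ranges.filter (fun s => decide (s.1 ≤ p ∧ p < s.2)) :=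
          List.mem_filter.2 ⟨hrmem, by simp only [decide_eq_true_eq]; omega⟩
        rw [get_min_ip_alt_go]
        split
        next hnone =>
          rw [pvMin2EqNone hnone] at hrc
          cases hrc
        next c hsome =>
          have hcf := pvMin2Mem hsome
          have hcmem : c ∈ ranges := (List.mem_filter.1 hcf).1
          have hcc : c.1 ≤ p ∧ p < c.2 := by
            have := (List.mem_filter.1 hcf).2
            simpa using this
          have hceq : c = r := by
            rcases List.mem_cons.1 ((H c hcc.2).1 hcmem) with h' | h'
            · exact h'
            · have h1 : ¬ pvLlt c r := (List.pairwise_cons.1 hpw).1 c h'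
              have h2 : ¬ pvLlt r c := pvMin2Min hsome r hrc
              have : c.1 = r.1 ∧ c.2 = r.2 := by
                simp only [pvLlt] at h1 h2; omega
              exact Prod.ext this.1 this.2
          subst hceq
          have hgo : get_min_ip_go (c :: rest) p = get_min_ip_go rest (c.2 + 1) := by
            simp [get_min_ip_go, hr1, hr2]
          rw [hgo]
          refine ih (c.2 + 1) ranges (List.Pairwise.of_cons hpw) ?_
          intro x hx
          have hx' : p < x.2 := by omega
          rw [H x hx']
          constructor
          · intro hxc
            rcases List.mem_cons.1 hxc with rfl | h' 
            · omega
            · exact h'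
          · exact List.mem_cons_of_mem c
      · -- dead head: r can never be a candidate again
        have hgo : get_min_ip_go (r :: rest) p = get_min_ip_go rest p := by
          simp [get_min_ip_go, hr1, hr2]
        rw [hgo]
        refine ih p ranges (List.Pairwise.of_cons hpw) ?_
        intro x hx
        rw [H x hx]
        constructor
        · intro hxc
          rcases List.mem_cons.1 hxc with rfl | h'
          · omega
          · exact h'
        · exact List.mem_cons_of_mem r

-- ===== VERDICT (by name: the statement is the Claim_ definition above) =====
theorem get_min_ip_spec : Claim_equal_get_min_ip := by
  unfold Claim_equal_get_min_ip
  intro ranges _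
  unfold Spec_get_min_ip
  show get_min_ip ranges = get_min_ip_alt ranges
  unfold get_min_ip get_min_ip_alt
  refine (pvMain _ 0 ranges (pvSortedPairwise ranges) ?_).symm
  intro x _
  exact (PySem.List.sorted2_perm ranges Prod.fst Prod.snd false).mem_iff.symm
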